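-- pv_equiv track=rewrite | github.com/liskos/kudryshov | ege15/167.py | f
-- ===== SOURCE A (Python) =====
-- def f(a):
--     p = {2,4,6,8,10,12,14,16,18,20}
--     q = {3,6,9,12,15,18,21,24,27,30}
--     for x in range(1,1000):
--         c = ((x not in p) or (x in a)) or ((x in a) or (x not in q))
--         if not c:
--             return False
--     return True
-- ===== SOURCE B (Python) =====
-- def f(a):
--     # p ∩ q within range(1,1000) is {6, 12, 18}; the loop fails exactly when one of them is missing from a
--     return all(k in a for k in (6, 12, 18))
-- ===== Notes on version B (the rewrite author's own statement) =====
-- stated objective: simpler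
-- what changed: Dropped the sets p, q and the 999-iteration loop; B directly checks that 6, 12 and 18 are all in a, since p∩q restricted to 1..999 is {6,12,18}.
import Mathlib
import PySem

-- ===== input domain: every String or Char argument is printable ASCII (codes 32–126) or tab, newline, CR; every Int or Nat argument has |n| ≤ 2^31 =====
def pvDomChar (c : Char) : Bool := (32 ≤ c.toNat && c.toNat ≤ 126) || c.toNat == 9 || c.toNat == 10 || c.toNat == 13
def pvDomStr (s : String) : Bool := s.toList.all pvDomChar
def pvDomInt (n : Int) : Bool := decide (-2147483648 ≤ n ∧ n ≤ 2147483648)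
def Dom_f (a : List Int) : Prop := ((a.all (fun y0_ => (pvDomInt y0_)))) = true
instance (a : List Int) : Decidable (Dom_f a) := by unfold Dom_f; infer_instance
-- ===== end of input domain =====

-- B replaces A's 999-iteration loop over sets p, q by a direct check that 6, 12, 18 are all in a (simpler).

-- ===== PORT A =====
def pA : PySem.Set Int := PySem.Set.ofList [2,4,6,8,10,12,14,16,18,20]
def qA : PySem.Set Int := PySem.Set.ofList [3,6,9,12,15,18,21,24,27,30]

-- the for-loop body: early return False when c is false, else continue
def fLoop (a : List Int) : List Int → Bool
  | [] => true
  | x :: rest =>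
      let c := ((!(PySem.Set.contains pA x)) || a.contains x) || (a.contains x || (!(PySem.Set.contains qA x)))
      if !c then false else fLoop a rest

def f (a : List Int) : Bool := fLoop a (PySem.List.pyRange 1 1000 1)

-- ===== PORT B =====
def f_alt (a : List Int) : Bool := [6, 12, 18].all (fun k => a.contains k)

-- ===== PRECONDITION & SPEC =====
def Spec_f (a : List Int) (out : Bool) : Prop := out = f_alt a
instance (a : List Int) (out : Bool) : Decidable (Spec_f a out) := by unfold Spec_f; infer_instance

-- ===== CLAIM (what is proved, stated in full; the proofs are below) =====
def Claim_equal_f : Prop := ∀ (a : List Int), Dom_f a → Spec_f a (f a)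

-- ===== LEMMAS AND PROOFS =====

def cBody (a : List Int) (x : Int) : Bool :=
  ((!(PySem.Set.contains pA x)) || a.contains x) || (a.contains x || (!(PySem.Set.contains qA x)))

-- the early-return loop computes 'all'
theorem fLoop_eq_all (a : List Int) (xs : List Int) : fLoop a xs = xs.all (cBody a) := by
  induction xs with
  | nil => rfl
  | cons x rest ih =>
      simp only [fLoop, List.all_cons, cBody]
      by_cases h : (((!(PySem.Set.contains pA x)) || a.contains x) || (a.contains x || (!(PySem.Set.contains qA x)))) = true
      · simp [h, ih]
      · simp at h
        simp [h]

-- when x is not in both p and q, the loop condition holds regardless of a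
theorem cBody_true_of_not_pq (a : List Int) (x : Int)
    (h : (PySem.Set.contains pA x && PySem.Set.contains qA x) = false) : cBody a x = true := by
  unfold cBody
  rcases Bool.and_eq_false_iff.mp h with h' | h' <;>
    · simp [PySem.Set.contains] at h'
      simp [h']

-- 'all' over a list equals 'all' over its filter when the predicate holds off the filter
theorem all_eq_all_filter (a : List Int) (xs : List Int)
    (p : Int → Bool) (hp : ∀ x, p x = false → cBody a x = true) :
    xs.all (cBody a) = (xs.filter p).all (cBody a) := by
  induction xs with
  | nil => rfl
  | cons x rest ih =>
      by_cases h : p x = true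
      · simp [List.filter_cons, h, ih]
      · simp only [Bool.not_eq_true] at h
        simp [List.filter_cons, h, hp x h, ih]

set_option maxRecDepth 100000 in
theorem filter_range_pq :
    (PySem.List.pyRange 1 1000 1).filter (fun x => PySem.Set.contains pA x && PySem.Set.contains qA x)
      = [6, 12, 18] := by decide

-- ===== VERDICT (by name: the statement is the Claim_ definition above) =====
theorem f_spec : Claim_equal_f := by
  intro a _
  show f a = f_alt a
  unfold f f_alt
  rw [fLoop_eq_all,
      all_eq_all_filter a _ (fun x => PySem.Set.contains pA x && PySem.Set.contains qA x)
        (cBody_true_of_not_pq a),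
      filter_range_pq]
  have h6 : (6:Int) ∈ pA ∧ (6:Int) ∈ qA := by decide
  have h12 : (12:Int) ∈ pA ∧ (12:Int) ∈ qA := by decide
  have h18 : (18:Int) ∈ pA ∧ (18:Int) ∈ qA := by decide
  simp [cBody, h6.1, h6.2, h12.1, h12.2, h18.1, h18.2]
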